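-- pv_equiv track=rewrite | github.com/WeixinWang24/Orbit2 | src/capability/models.py | is_protected_relative_path
-- ===== SOURCE A (Python) =====
-- PROTECTED_PATH_PREFIXES: tuple[str, ...] = (".runtime", ".env", ".envrc", ".git")
--
-- def is_protected_relative_path(relative: str) -> str | None:
--     """Return the matched protected prefix if `relative` targets one, else None.
--
--     `relative` must already be a workspace-relative POSIX-style path string.
--     Matches `.git`, `.git/hooks/...`, `.env.local`, `.env/foo`, etc.
--     """
--     normalized = relative.replace("\\", "/")
--     for prefix in PROTECTED_PATH_PREFIXES:
--         if normalized == prefix: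
--             return prefix
--         if normalized.startswith(prefix + "/"):
--             return prefix
--         if normalized.startswith(prefix + "."):
--             return prefix
--     return None
-- ===== SOURCE B (Python) =====
-- PROTECTED_PATH_PREFIXES: tuple[str, ...] = (".runtime", ".env", ".envrc", ".git")
--
--
-- def is_protected_relative_path(relative: str) -> str | None:
--     """Return the matched protected prefix if `relative` targets one, else None."""
--     normalized = relative.replace("\\", "/")
--     slash = normalized.find("/")
--     segment = normalized if slash < 0 else normalized[:slash]
--     # a prefix matches iff it is the whole first segment, or the first segment
--     # truncated just before one of its dots
--     candidates = [segment] + [segment[:i] for i, ch in enumerate(segment) if ch == "."]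
--     for prefix in PROTECTED_PATH_PREFIXES:
--         if prefix in candidates:
--             return prefix
--     return None
-- ===== Notes on version B (the rewrite author's own statement) =====
-- stated objective: alternative
-- what changed: B computes the first path segment of the normalized path once and derives the possible match keys from the input (the segment and its truncations at each dot), then returns the first protected prefix among those keys, instead of testing every protected prefix against the whole string with == and two startswith probes.
import Mathlib
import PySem

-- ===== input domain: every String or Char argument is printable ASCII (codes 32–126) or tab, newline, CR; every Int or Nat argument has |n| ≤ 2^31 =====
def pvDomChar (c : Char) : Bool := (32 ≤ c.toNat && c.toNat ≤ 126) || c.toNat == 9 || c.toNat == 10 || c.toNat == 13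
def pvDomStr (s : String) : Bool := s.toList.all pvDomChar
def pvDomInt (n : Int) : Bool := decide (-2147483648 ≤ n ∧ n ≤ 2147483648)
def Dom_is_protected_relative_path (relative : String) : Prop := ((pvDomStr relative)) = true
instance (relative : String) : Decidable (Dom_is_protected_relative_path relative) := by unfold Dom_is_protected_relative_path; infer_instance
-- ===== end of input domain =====

-- B derives the possible match keys from the input's first path segment (the segment and its
-- truncations at dots) and looks them up, instead of testing each protected prefix with startswith
-- three times against the whole string (objective: alternative decomposition, similar cost).

def pvProtectedPrefixes : List String := [".runtime", ".env", ".envrc", ".git"]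

-- ===== PORT A =====
def pvALoop (normalized : String) : List String → Option String
  | [] => none
  | pfx :: rest =>
    if normalized == pfx then some pfx
    else if PySem.Str.startswith normalized (pfx ++ "/") then some pfx
    else if PySem.Str.startswith normalized (pfx ++ ".") then some pfx
    else pvALoop normalized rest

def is_protected_relative_path (relative : String) : Option String :=
  let normalized := PySem.Str.replace relative "\\" "/"
  pvALoop normalized pvProtectedPrefixes

-- ===== PORT B =====
def pvBLoop (candidates : List String) : List String → Option String
  | [] => none
  | pfx :: rest => if candidates.contains pfx then some pfx else pvBLoop candidates rest

def is_protected_relative_path_alt (relative : String) : Option String :=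
  let normalized := PySem.Str.replace relative "\\" "/"
  let slash := PySem.Str.find normalized "/"
  let segment := if slash < 0 then normalized else PySem.Str.slice normalized none (some slash)
  let candidates := [segment] ++ (PySem.List.enumerate segment.toList 0).filterMap
      (fun q => if q.2 == '.' then some (PySem.Str.slice segment none (some q.1)) else none)
  pvBLoop candidates pvProtectedPrefixes

-- ===== PRECONDITION & SPEC =====
def Spec_is_protected_relative_path (relative : String) (out : Option String) : Prop := out = is_protected_relative_path_alt relative
instance (relative : String) (out : Option String) : Decidable (Spec_is_protected_relative_path relative out) := by unfold Spec_is_protected_relative_path; infer_instance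

-- ===== CLAIM (what is proved, stated in full; the proofs are below) =====
def Claim_equal_is_protected_relative_path : Prop := ∀ (relative : String), Dom_is_protected_relative_path relative → Spec_is_protected_relative_path relative (is_protected_relative_path relative)

-- ===== LEMMAS AND PROOFS =====

-- the first path segment of the normalized string (proof-side abbreviation)
def pvSeg (s : List Char) : List Char := s.takeWhile (· ≠ '/')

-- B's segment and candidate list, written out (definitionally what the port computes)
def pvSegStr (ns : String) : String :=
  if PySem.Str.find ns "/" < 0 then ns else PySem.Str.slice ns none (some (PySem.Str.find ns "/"))

def pvCands (ns : String) : List String :=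
  [pvSegStr ns] ++ (PySem.List.enumerate (pvSegStr ns).toList 0).filterMap
      (fun q => if q.2 == '.' then some (PySem.Str.slice (pvSegStr ns) none (some q.1)) else none)

theorem pv_alt_eq (relative : String) :
    is_protected_relative_path_alt relative
      = pvBLoop (pvCands (PySem.Str.replace relative "\\" "/")) pvProtectedPrefixes := rfl

theorem pv_singleton_prefix (a : Char) (l : List Char) : [a] <+: l ↔ l.head? = some a := by
  cases l <;> simp [List.cons_prefix_cons, eq_comm]

theorem pv_takeWhile_append (l1 l2 : List Char) (p : Char → Bool) (h : ∀ a ∈ l1, p a) :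
    (l1 ++ l2).takeWhile p = l1 ++ l2.takeWhile p := by
  rw [List.takeWhile_append]
  simp [List.takeWhile_eq_self_iff.mpr h]

-- a slash-free prefix of s is a prefix of s's first segment
theorem pv_prefix_takeWhile {p s : List Char} (hp : '/' ∉ p) :
    p <+: s ↔ p <+: pvSeg s := by
  constructor
  · rintro ⟨u, rfl⟩
    rw [pvSeg, pv_takeWhile_append p u _ (by intro a ha; simp; rintro rfl; exact hp ha)]
    exact List.prefix_append p _
  · intro h
    exact h.trans (List.takeWhile_prefix _)

-- A's "== prefix or startswith prefix+'/'" is exactly "the first segment IS the prefix"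
theorem pv_seg_eq_iff {p s : List Char} (hp : '/' ∉ p) :
    pvSeg s = p ↔ (s = p ∨ (p ++ ['/']) <+: s) := by
  constructor
  · intro h
    rcases hd : s.dropWhile (· ≠ '/') with _ | ⟨c, t⟩
    · left
      have hs := List.takeWhile_append_dropWhile (p := fun x => decide (x ≠ '/')) (l := s)
      rw [hd, List.append_nil] at hs
      rw [← hs]; exact h
    · right
      have hc : c = '/' := by
        have := List.head?_dropWhile_not (fun x => decide (x ≠ '/')) s
        rw [hd] at this; simpa using this
      have hs : s = p ++ c :: t := by
        rw [← List.takeWhile_append_dropWhile (p := fun x => decide (x ≠ '/')) (l := s), hd]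
        rw [pvSeg] at h; rw [h]
      exact ⟨t, by rw [hs, hc]; simp⟩
  · rintro (rfl | ⟨u, rfl⟩)
    · exact List.takeWhile_eq_self_iff.mpr (by intro a ha; simp; rintro rfl; exact hp ha)
    · rw [pvSeg, List.append_assoc,
          pv_takeWhile_append p _ _ (by intro a ha; simp; rintro rfl; exact hp ha)]
      simp

-- A's "startswith prefix+'.'" is exactly "the prefix is the segment cut at one of its dots"
theorem pv_dot_iff {p s : List Char} (hp : '/' ∉ p) :
    (p ++ ['.']) <+: s ↔
      ∃ i, ∃ _ : i < (pvSeg s).length, (pvSeg s)[i] = '.' ∧ p = (pvSeg s).take i := by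
  constructor
  · intro h
    have hp' : '/' ∉ p ++ ['.'] := by
      intro hm; rcases List.mem_append.mp hm with hm | hm
      · exact hp hm
      · simp at hm
    obtain ⟨u, hu⟩ := (pv_prefix_takeWhile hp').mp h
    have hu' : pvSeg s = p ++ '.' :: u := by rw [← hu]; simp
    refine ⟨p.length, ?_, ?_, ?_⟩
    · rw [hu']; simp
    · rw [List.getElem_eq_iff, hu']
      simp
    · rw [hu']; exact List.take_left.symm
  · rintro ⟨i, hi, hdot, rfl⟩
    have h1 : (pvSeg s).take (i + 1) <+: pvSeg s := List.take_prefix _ _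
    have h2 : (pvSeg s).take (i + 1) = (pvSeg s).take i ++ ['.'] := by
      rw [List.take_succ_eq_append_getElem hi, hdot]
    exact ((h2 ▸ h1).trans (List.takeWhile_prefix _))

theorem pv_take_eq_takeWhile :
    ∀ (s : List Char) (j : Nat), (∀ i, i < j → ¬ s[i]? = some '/') → s[j]? = some '/' →
      s.take j = s.takeWhile (· ≠ '/')
  | [], j, _, hj => by simp at hj
  | c :: t, 0, _, hj => by
    simp at hj
    simp [hj]
  | c :: t, j + 1, hlt, hj => by
    have hc : c ≠ '/' := by
      intro hcc; exact hlt 0 (by omega) (by simp [hcc])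
    simp only [List.take_succ_cons, List.takeWhile_cons]
    rw [pv_take_eq_takeWhile t j (fun i hi => by
          have := hlt (i + 1) (by omega); simpa using this)
        (by simpa using hj)]
    simp [hc]

theorem pv_segStr_toList (ns : String) : (pvSegStr ns).toList = pvSeg ns.toList := by
  unfold pvSegStr pvSeg
  have hfind : PySem.Str.find ns "/" = PySem.Chars.find ns.toList ['/'] := PySem.Str.find_eq ns "/"
  by_cases h : PySem.Str.find ns "/" < 0
  · rw [if_pos h]
    have h1 : PySem.Chars.find ns.toList ['/'] = -1 := by
      have := PySem.Chars.neg_one_le_find ns.toList ['/']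
      omega
    have h2 : ¬ ['/'] <:+: ns.toList := (PySem.Chars.find_eq_neg_one_iff _ _).mp h1
    have h3 : '/' ∉ ns.toList := fun hm => h2 ((List.singleton_infix_iff _ _).mpr hm)
    exact (List.takeWhile_eq_self_iff.mpr (by intro a ha; simp; rintro rfl; exact h3 ha)).symm
  · rw [if_neg h]
    rw [not_lt] at h
    rw [PySem.Str.toList_slice, PySem.Chars.slice_eq_listSlice, PySem.List.slice_to _ h]
    obtain ⟨hpre, hmin⟩ := PySem.Chars.find_spec (s := ns.toList) (sub := ['/']) (hfind ▸ h)
    rw [hfind]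
    apply pv_take_eq_takeWhile
    · intro i hi hsome
      exact hmin i hi ((pv_singleton_prefix _ _).mpr (by rw [List.head?_drop]; exact hsome))
    · have := (pv_singleton_prefix _ _).mp hpre
      rw [List.head?_drop] at this; exact this

theorem pv_mem_cands (ns pfx : String) :
    pfx ∈ pvCands ns ↔
      (pfx.toList = pvSeg ns.toList ∨
       ∃ i, ∃ _ : i < (pvSeg ns.toList).length,
         (pvSeg ns.toList)[i] = '.' ∧ pfx.toList = (pvSeg ns.toList).take i) := by
  rw [pvCands]
  rw [List.mem_append, List.mem_singleton, List.mem_filterMap]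
  constructor
  · rintro (rfl | ⟨q, hq, hf⟩)
    · left; exact pv_segStr_toList ns
    · obtain ⟨k, hk, rfl⟩ := (PySem.List.mem_enumerate_iff _ _ _).mp hq
      simp only [beq_iff_eq] at hf
      by_cases hdot : (pvSegStr ns).toList[k] = '.'
      · rw [if_pos hdot] at hf
        right
        refine ⟨k, by rw [← pv_segStr_toList]; exact hk,
          by rw [List.getElem_eq_iff, ← pv_segStr_toList, List.getElem?_eq_getElem hk, hdot], ?_⟩
        have := congrArg String.toList (Option.some_injective _ hf)
        rw [← this, PySem.Str.toList_slice, PySem.Chars.slice_eq_listSlice]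
        rw [show ((0 : Int) + (k : Int)) = ((k : Nat) : Int) by omega]
        rw [PySem.List.slice_to _ (by omega)]
        simp [pv_segStr_toList]
      · rw [if_neg hdot] at hf
        exact absurd hf (by simp)
  · rintro (h | ⟨i, hi, hdot, hp⟩)
    · left; rw [← String.toList_inj, pv_segStr_toList]; exact h
    · right
      have hi' : i < (pvSegStr ns).toList.length := by rw [pv_segStr_toList]; exact hi
      refine ⟨(0 + (i : Int), (pvSegStr ns).toList[i]), ?_, ?_⟩
      · exact (PySem.List.mem_enumerate_iff _ _ _).mpr ⟨i, hi', rfl⟩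
      · have hd : (pvSegStr ns).toList[i] = '.' := by
          have := pv_segStr_toList ns
          simp only [List.getElem_eq_iff]
          rw [this]
          exact List.getElem?_eq_getElem hi ▸ (by rw [hdot])
        simp only [hd, beq_self_eq_true, if_true]
        congr 1
        rw [← String.toList_inj, PySem.Str.toList_slice, PySem.Chars.slice_eq_listSlice]
        rw [show ((0 : Int) + (i : Int)) = ((i : Nat) : Int) by omega]
        rw [PySem.List.slice_to _ (by omega)]
        simp [hp, pv_segStr_toList]

theorem pv_cond (ns pfx : String) (hp : '/' ∉ pfx.toList) :
    ((ns == pfx) = true ∨ PySem.Str.startswith ns (pfx ++ "/") = true ∨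
      PySem.Str.startswith ns (pfx ++ ".") = true)
    ↔ pfx ∈ pvCands ns := by
  rw [pv_mem_cands]
  rw [beq_iff_eq, ← String.toList_inj]
  rw [PySem.Str.startswith_eq, PySem.Str.startswith_eq, PySem.Chars.startswith_iff,
      PySem.Chars.startswith_iff, String.toList_append, String.toList_append]
  have hsl : ("/" : String).toList = ['/'] := rfl
  have hdt : ("." : String).toList = ['.'] := rfl
  rw [hsl, hdt]
  constructor
  · rintro (h | h | h)
    · left; exact ((pv_seg_eq_iff hp).mpr (Or.inl h)).symm
    · left; exact ((pv_seg_eq_iff hp).mpr (Or.inr h)).symm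
    · right; exact (pv_dot_iff hp).mp h
  · rintro (h | h)
    · rcases (pv_seg_eq_iff hp).mp h.symm with h1 | h2
      · left; exact h1
      · right; left; exact h2
    · right; right; exact (pv_dot_iff hp).mpr h

theorem pv_loop (ns : String) (ps : List String) (h : ∀ p ∈ ps, '/' ∉ p.toList) :
    pvALoop ns ps = pvBLoop (pvCands ns) ps := by
  induction ps with
  | nil => rfl
  | cons p rest ih =>
    have hp := h p (by simp)
    have hrest : ∀ q ∈ rest, '/' ∉ q.toList := fun q hq => h q (by simp [hq])
    have hA : pvALoop ns (p :: rest) =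
        if ns == p then some p
        else if PySem.Str.startswith ns (p ++ "/") then some p
        else if PySem.Str.startswith ns (p ++ ".") then some p
        else pvALoop ns rest := rfl
    have hB : pvBLoop (pvCands ns) (p :: rest) =
        if (pvCands ns).contains p then some p else pvBLoop (pvCands ns) rest := rfl
    rw [hA, hB]
    by_cases hc : p ∈ pvCands ns
    · rw [if_pos (List.contains_iff_mem.mpr hc)]
      have hor := (pv_cond ns p hp).mpr hc
      split_ifs with a b c
      · rfl
      · rfl
      · rfl
      · rcases hor with h1 | h2 | h3
        · exact absurd h1 a
        · exact absurd h2 b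
        · exact absurd h3 c
    · have hor := (Iff.not (pv_cond ns p hp)).mpr hc
      rw [not_or, not_or] at hor
      obtain ⟨h1, h2, h3⟩ := hor
      rw [if_neg h1, if_neg h2, if_neg h3,
        if_neg (show ¬ ((pvCands ns).contains p = true) by
          simpa [List.contains_iff_mem] using hc)]
      exact ih hrest

theorem pv_main (relative : String) :
    is_protected_relative_path relative = is_protected_relative_path_alt relative := by
  rw [pv_alt_eq]
  show pvALoop (PySem.Str.replace relative "\\" "/") pvProtectedPrefixes = _
  apply pv_loop
  intro p hpm
  fin_cases hpm <;> decide

-- ===== VERDICT (by name: the statement is the Claim_ definition above) =====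
theorem is_protected_relative_path_spec : Claim_equal_is_protected_relative_path := by
  intro r _
  exact pv_main r
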